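-- pv_equiv track=rewrite | github.com/me-dev52/Isro_MosdacAI | mosdac/src/nlp/query_processor.py | get_query_suggestions
-- ===== SOURCE A (Python) =====
-- from typing import Dict, List, Any, Optional, Tuple
--
-- def get_query_suggestions(query: str, limit: int = 5) -> List[str]:
--     """
--     Get query suggestions based on input
--
--     Args:
--         query: User query
--         limit: Maximum number of suggestions
--
--     Returns:
--         List of query suggestions
--     """
--     suggestions = []
--
--     # Common MOSDAC-related queries
--     common_queries = [
--         "What satellite data is available for my region?",
--         "How do I download satellite imagery?",
--         "What is the spatial resolution of the data?",
--         "How do I use the MOSDAC API?",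
--         "What sensors are available?",
--         "How do I access historical data?",
--         "What file formats are supported?",
--         "How do I get technical support?"
--     ]
--
--     # Find relevant suggestions based on query content
--     query_lower = query.lower()
--     for suggestion in common_queries:
--         if any(word in query_lower for word in suggestion.lower().split()):
--             suggestions.append(suggestion)
--
--     # Add general suggestions if not enough specific ones
--     while len(suggestions) < limit and len(suggestions) < len(common_queries):
--         for suggestion in common_queries:
--             if suggestion not in suggestions:
--                 suggestions.append(suggestion)
--                 break
--
--     return suggestions[:limit]
-- ===== SOURCE B (Python) =====
-- from typing import List
--
-- def get_query_suggestions(query: str, limit: int = 5) -> List[str]: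
--     common_queries = [
--         "What satellite data is available for my region?",
--         "How do I download satellite imagery?",
--         "What is the spatial resolution of the data?",
--         "How do I use the MOSDAC API?",
--         "What sensors are available?",
--         "How do I access historical data?",
--         "What file formats are supported?",
--         "How do I get technical support?"
--     ]
--     query_lower = query.lower()
--     matched = [q for q in common_queries
--                if any(word in query_lower for word in q.lower().split())]
--     if len(matched) < limit:
--         result = matched + [q for q in common_queries if q not in matched]
--     else:
--         result = matched
--     return result[:limit]
-- ===== Notes on version B (the rewrite author's own statement) =====
-- stated objective: simpler
-- what changed: A's rescanning while/for fill loop (one full scan of common_queries per appended suggestion) is replaced by a single complement filter: result = matched + unmatched when len(matched) < limit, else matched, then one slice.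
import Mathlib
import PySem

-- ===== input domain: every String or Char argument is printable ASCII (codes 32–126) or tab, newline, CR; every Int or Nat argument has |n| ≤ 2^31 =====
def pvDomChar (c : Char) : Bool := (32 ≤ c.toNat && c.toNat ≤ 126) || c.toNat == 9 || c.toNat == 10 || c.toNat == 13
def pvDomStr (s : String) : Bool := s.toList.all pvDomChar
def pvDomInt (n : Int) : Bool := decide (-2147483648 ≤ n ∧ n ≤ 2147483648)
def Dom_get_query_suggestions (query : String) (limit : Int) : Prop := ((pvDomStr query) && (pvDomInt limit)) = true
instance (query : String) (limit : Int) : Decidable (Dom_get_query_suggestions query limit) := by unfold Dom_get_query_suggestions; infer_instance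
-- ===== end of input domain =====

-- B replaces A's rescanning while/for fill loop by a single complement concatenation
-- (matched ++ unmatched when len(matched) < limit), then slices; objective: simpler.

-- the module-level constant list both versions share
def pvCommonQueries : List String :=
  ["What satellite data is available for my region?",
   "How do I download satellite imagery?",
   "What is the spatial resolution of the data?",
   "How do I use the MOSDAC API?",
   "What sensors are available?",
   "How do I access historical data?",
   "What file formats are supported?",
   "How do I get technical support?"]

-- ===== PORT A =====
-- A's 'while len < limit and len < len(cq): for s in cq: if s not in suggestions: append; break':
-- the inner for-with-break is find?; each pass appends that first unmatched suggestion.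
def pvFillLoopA (common_queries : List String) (limit : Int) (suggestions : List String) : List String :=
  if _h : (suggestions.length : Int) < limit ∧ suggestions.length < common_queries.length then
    match common_queries.find? (fun s => !(suggestions.contains s)) with
    | some s => pvFillLoopA common_queries limit (suggestions ++ [s])
    | none => suggestions
  else suggestions
termination_by common_queries.length - suggestions.length
decreasing_by simp; omega

def get_query_suggestions (query : String) (limit : Int) : List String :=
  let query_lower := PySem.Str.lower query
  let suggestions := pvCommonQueries.foldl
    (fun acc suggestion =>
      if (PySem.Str.split₀ (PySem.Str.lower suggestion)).any
           (fun word => PySem.Str.isIn word query_lower)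
      then acc ++ [suggestion] else acc) []
  PySem.List.slice (pvFillLoopA pvCommonQueries limit suggestions) none (some limit)

-- ===== PORT B =====
def get_query_suggestions_alt (query : String) (limit : Int) : List String :=
  let query_lower := PySem.Str.lower query
  let matched := pvCommonQueries.filter
    (fun q => (PySem.Str.split₀ (PySem.Str.lower q)).any
                (fun word => PySem.Str.isIn word query_lower))
  let result :=
    if (matched.length : Int) < limit
    then matched ++ pvCommonQueries.filter (fun q => !(matched.contains q))
    else matched
  PySem.List.slice result none (some limit)

-- ===== PRECONDITION & SPEC =====
def Spec_get_query_suggestions (query : String) (limit : Int) (out : List String) : Prop := out = get_query_suggestions_alt query limit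
instance (query : String) (limit : Int) (out : List String) : Decidable (Spec_get_query_suggestions query limit out) := by unfold Spec_get_query_suggestions; infer_instance

-- ===== CLAIM (what is proved, stated in full; the proofs are below) =====
def Claim_equal_get_query_suggestions : Prop := ∀ (query : String) (limit : Int), Dom_get_query_suggestions query limit → Spec_get_query_suggestions query limit (get_query_suggestions query limit)


lemma pv_fill_spec (cq : List String) (limit : Int) (hcq : cq.Nodup) :
    ∀ (n : Nat) (s : List String), cq.length - s.length ≤ n → s.Nodup → (∀ x ∈ s, x ∈ cq) →
      pvFillLoopA cq limit s =
        s ++ (cq.filter (fun x => !(s.contains x))).take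
              ((min limit (cq.length : Int) - s.length).toNat) := by
  intro n
  induction n with
  | zero =>
    intro s hn hnd hsub
    rw [pvFillLoopA, dif_neg (by omega)]
    have hk : (min limit (cq.length : Int) - s.length).toNat = 0 := by
      have : min limit (cq.length : Int) ≤ (cq.length : Int) := min_le_right _ _
      omega
    simp [hk]
  | succ n ih =>
    intro s hn hnd hsub
    by_cases hc : (s.length : Int) < limit ∧ s.length < cq.length
    · -- the unmatched suggestions are nonempty
      have hslen : (cq.filter (fun x => s.contains x)).length ≤ s.length := by
        refine (List.subperm_of_subset (hcq.filter _) ?_).length_le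
        intro x hx
        have := List.of_mem_filter hx
        simpa [List.contains_eq_mem] using this
      have hpart := List.length_eq_length_filter_add (l := cq) (f := fun x => s.contains x)
      obtain ⟨x, rest, hFx⟩ : ∃ x rest, cq.filter (fun x => !(s.contains x)) = x :: rest := by
        cases hF : cq.filter (fun x => !(s.contains x)) with
        | nil => exfalso; rw [hF] at hpart; simp only [List.length_nil] at hpart; omega
        | cons x rest => exact ⟨x, rest, rfl⟩
      have hfind : cq.find? (fun s' => !(s.contains s')) = some x := by
        rw [← List.head?_filter, hFx]; rfl
      have hxmem : x ∈ cq := List.mem_of_mem_filter (hFx ▸ List.mem_cons_self)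
      have hxnot : x ∉ s := by
        have := List.of_mem_filter (hFx ▸ List.mem_cons_self)
        simpa [List.contains_eq_mem] using this
      rw [pvFillLoopA, dif_pos hc, hfind]
      have hrec := ih (s ++ [x]) (by simp; omega)
        (by simp [List.nodup_append, hnd]; exact fun a ha h => hxnot (h ▸ ha))
        (by intro y hy; rcases List.mem_append.1 hy with h | h
            · exact hsub y h
            · simpa using (List.mem_singleton.1 h ▸ hxmem))
      show pvFillLoopA cq limit (s ++ [x]) = _
      rw [hrec]
      -- the new complement is the tail of the old one
      have hnodupF : (cq.filter (fun x => !(s.contains x))).Nodup := hcq.filter _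
      have hxrest : x ∉ rest := by rw [hFx] at hnodupF; simp at hnodupF; exact hnodupF.1
      have hcomp : cq.filter (fun y => !((s ++ [x]).contains y)) = rest := by
        have h1 : cq.filter (fun y => !((s ++ [x]).contains y))
            = (cq.filter (fun y => !(s.contains y))).filter (fun y => !(y == x)) := by
          rw [List.filter_filter]
          refine List.filter_congr ?_
          intro y _
          simp only [List.contains_eq_mem, List.mem_append, List.mem_singleton]
          by_cases hxy : y = x <;> by_cases hys : y ∈ s <;> simp [hxy, hys]
        rw [h1, hFx]
        have h2 : (x :: rest).filter (fun y => !(y == x)) = rest.filter (fun y => !(y == x)) := by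
          simp
        rw [h2]
        refine List.filter_eq_self.2 ?_
        intro y hy
        have hyx : y ≠ x := fun hyx => hxrest (hyx ▸ hy)
        simp [hyx]
      rw [hcomp, hFx]
      have hk : (min limit (cq.length : Int) - s.length).toNat
          = (min limit (cq.length : Int) - (s.length + 1)).toNat + 1 := by
        by_cases h : limit ≤ (cq.length : Int)
        · rw [min_eq_left h]; omega
        · rw [min_eq_right (by omega)]; omega
      simp only [List.length_append, List.length_singleton, Nat.cast_add, Nat.cast_one] at hk ⊢
      rw [hk, List.take_succ_cons, List.append_assoc, List.singleton_append]
    · rw [pvFillLoopA, dif_neg hc]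
      have hk : (min limit (cq.length : Int) - s.length).toNat = 0 := by
        rcases not_and_or.1 hc with h | h
        · have : min limit (cq.length : Int) ≤ limit := min_le_left _ _
          omega
        · have : min limit (cq.length : Int) ≤ (cq.length : Int) := min_le_right _ _
          omega
      simp [hk]

lemma pv_nodup_common : pvCommonQueries.Nodup := by decide

lemma pv_take_min (u : List String) (a k : Nat) (h : a ≤ k ∨ u.length ≤ k) :
    u.take (min a k) = u.take a := by
  rcases h with h | h
  · rw [min_eq_left h]
  · by_cases h2 : a ≤ k
    · rw [min_eq_left h2]
    · rw [min_eq_right (by omega), List.take_of_length_le (by omega),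
          List.take_of_length_le (by omega)]

theorem get_query_suggestions_spec : Claim_equal_get_query_suggestions := by
  intro query limit _
  unfold Spec_get_query_suggestions get_query_suggestions get_query_suggestions_alt
  simp only []
  set p : String → Bool := fun q =>
    (PySem.Str.split₀ (PySem.Str.lower q)).any
      (fun word => PySem.Str.isIn word (PySem.Str.lower query)) with hp
  rw [PySem.List.foldl_append_if_eq_filter, List.nil_append]
  set matched := pvCommonQueries.filter p with hm
  have hnd : matched.Nodup := pv_nodup_common.filter _
  have hsub : ∀ x ∈ matched, x ∈ pvCommonQueries := fun x hx => List.mem_of_mem_filter hx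
  rw [pv_fill_spec pvCommonQueries limit pv_nodup_common pvCommonQueries.length matched
        (by omega) hnd hsub]
  set U := pvCommonQueries.filter (fun q => !(matched.contains q)) with hU
  have hmlen : matched.length ≤ pvCommonQueries.length := List.length_filter_le _ _
  have hUlen : matched.length + U.length = pvCommonQueries.length := by
    have hcongr : U = pvCommonQueries.filter (fun q => !(p q)) := by
      refine List.filter_congr ?_
      intro y hy
      simp [List.contains_eq_mem, hm, List.mem_filter, hy]
    rw [hcongr, hm]
    exact (List.length_eq_length_filter_add (l := pvCommonQueries) (f := p)).symm
  by_cases hlt : (matched.length : Int) < limit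
  · rw [if_pos hlt]
    have hpos : 0 ≤ limit := by omega
    rw [PySem.List.slice_to _ hpos, PySem.List.slice_to _ hpos]
    rw [List.take_append, List.take_append,
        List.take_of_length_le (l := matched) (by omega), List.take_take]
    have hcond : limit.toNat - matched.length ≤ (min limit (pvCommonQueries.length : Int) - matched.length).toNat
        ∨ U.length ≤ (min limit (pvCommonQueries.length : Int) - matched.length).toNat := by
      by_cases h : limit ≤ (pvCommonQueries.length : Int)
      · left; rw [min_eq_left h]; omega
      · right; rw [min_eq_right (by omega)]; omega
    rw [pv_take_min U _ _ hcond]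
  · rw [if_neg hlt]
    have hk : (min limit (pvCommonQueries.length : Int) - matched.length).toNat = 0 := by
      have : min limit (pvCommonQueries.length : Int) ≤ limit := min_le_left _ _
      omega
    rw [hk]
    simp
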